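-- pv_equiv track=rewrite | github.com/lmp2000/python_mod07 | ex3/AggressiveStrategy.py | prioritize_targets
-- ===== SOURCE A (Python) =====
-- def prioritize_targets(available_targets: list) -> list:
--     enemy_creatures = []
--     enemy_players = []
--     others = []
--     for target in available_targets:
--         target_text = str(target).lower()
--         if 'player' in target_text:
--             enemy_players.append(target)
--         elif 'enemy' in target_text:
--             enemy_creatures.append(target)
--         else:
--             others.append(target)
--     prioritized = enemy_creatures + enemy_players + others
--     if not prioritized:
--         return ['Enemy Player']
--     return prioritized
-- ===== SOURCE B (Python) =====
-- def prioritize_targets(available_targets: list) -> list: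
--     def key(target):
--         text = str(target).lower()
--         if 'player' in text:
--             return 1
--         if 'enemy' in text:
--             return 0
--         return 2
--     result = sorted(available_targets, key=key)
--     if not result:
--         return ['Enemy Player']
--     return result
-- ===== Notes on version B (the rewrite author's own statement) =====
-- stated objective: idiomatic
-- what changed: Replaces the three explicit accumulator buckets with a single stable sort over a 3-valued priority key (enemy=0, player=1, other=2), relying on sort stability to preserve within-group order.
import Mathlib
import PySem

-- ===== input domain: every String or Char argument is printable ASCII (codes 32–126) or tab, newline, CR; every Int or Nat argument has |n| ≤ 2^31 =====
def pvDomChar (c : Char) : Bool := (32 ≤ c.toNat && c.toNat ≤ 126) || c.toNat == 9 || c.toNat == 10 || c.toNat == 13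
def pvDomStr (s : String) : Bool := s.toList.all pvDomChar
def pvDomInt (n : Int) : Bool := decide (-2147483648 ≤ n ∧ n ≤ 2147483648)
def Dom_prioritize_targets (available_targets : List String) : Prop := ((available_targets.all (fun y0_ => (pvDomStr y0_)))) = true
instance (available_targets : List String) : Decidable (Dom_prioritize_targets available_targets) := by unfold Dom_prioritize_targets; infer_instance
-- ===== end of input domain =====

-- B replaces A's three explicit buckets by a single stable sort over a 3-valued priority key: same result, more idiomatic.


-- ===== PORT A =====
-- loop body of A: dispatch one target into the three buckets (enemy_creatures, enemy_players, others)
def pvStepA (acc : List String × List String × List String) (target : String) :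
    List String × List String × List String :=
  let target_text := PySem.Str.lower target
  if PySem.Str.isIn "player" target_text then (acc.1, acc.2.1 ++ [target], acc.2.2)
  else if PySem.Str.isIn "enemy" target_text then (acc.1 ++ [target], acc.2.1, acc.2.2)
  else (acc.1, acc.2.1, acc.2.2 ++ [target])

def prioritize_targets (available_targets : List String) : List String :=
  let buckets := available_targets.foldl pvStepA ([], [], [])
  let prioritized := buckets.1 ++ buckets.2.1 ++ buckets.2.2
  if prioritized = [] then ["Enemy Player"] else prioritized

-- ===== PORT B =====
-- Source B's key: 1 if 'player' in text, 0 if 'enemy' in text, else 2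
def pvKey (target : String) : Int :=
  let text := PySem.Str.lower target
  if PySem.Str.isIn "player" text then 1
  else if PySem.Str.isIn "enemy" text then 0
  else 2

def prioritize_targets_alt (available_targets : List String) : List String :=
  let result := PySem.List.sorted available_targets pvKey
  if result = [] then ["Enemy Player"] else result

-- ===== PRECONDITION & SPEC =====
def Spec_prioritize_targets (available_targets : List String) (out : List String) : Prop := out = prioritize_targets_alt available_targets
instance (available_targets : List String) (out : List String) : Decidable (Spec_prioritize_targets available_targets out) := by unfold Spec_prioritize_targets; infer_instance

-- ===== CLAIM (what is proved, stated in full; the proofs are below) =====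
def Claim_equal_prioritize_targets : Prop := ∀ (available_targets : List String), Dom_prioritize_targets available_targets → Spec_prioritize_targets available_targets (prioritize_targets available_targets)

-- ===== LEMMAS AND PROOFS =====

-- A's fold fills the three buckets with exactly the key-0, key-1 and key-2 targets, in order.
theorem foldl_stepA (ts : List String) (ec ep ot : List String) :
    ts.foldl pvStepA (ec, ep, ot) =
      (ec ++ ts.filter (fun t => pvKey t == 0),
       ep ++ ts.filter (fun t => pvKey t == 1),
       ot ++ ts.filter (fun t => pvKey t == 2)) := by
  induction ts generalizing ec ep ot with
  | nil => simp
  | cons t ts ih =>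
    simp only [List.foldl_cons]
    by_cases h1 : PySem.Str.isIn "player" (PySem.Str.lower t) = true
    all_goals simp at h1
    · have hk : pvKey t = 1 := by simp [pvKey, h1]
      have hs : pvStepA (ec, ep, ot) t = (ec, ep ++ [t], ot) := by simp [pvStepA, h1]
      rw [hs, ih]
      simp [hk]
    · by_cases h2 : PySem.Str.isIn "enemy" (PySem.Str.lower t) = true
      all_goals simp at h2
      · have hk : pvKey t = 0 := by simp [pvKey, h1, h2]
        have hs : pvStepA (ec, ep, ot) t = (ec ++ [t], ep, ot) := by simp [pvStepA, h1, h2]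
        rw [hs, ih]
        simp [hk]
      · have hk : pvKey t = 2 := by simp [pvKey, h1, h2]
        have hs : pvStepA (ec, ep, ot) t = (ec, ep, ot ++ [t]) := by simp [pvStepA, h1, h2]
        rw [hs, ih]
        simp [hk]

-- insert x after a prefix whose elements are all not-before x, directly before a suffix of all-before elements
theorem insertBy_mid {α : Type} (bef : α → α → Bool) (x : α) (as bs : List α)
    (ha : ∀ y ∈ as, bef x y = false) (hb : ∀ y ∈ bs, bef x y = true) :
    PySem.List.insertBy bef x (as ++ bs) = as ++ x :: bs := by
  induction as with
  | nil =>
    cases bs with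
    | nil => rfl
    | cons b bs => simp [PySem.List.insertBy, hb b (by simp)]
  | cons a as ih =>
    have := ha a (by simp)
    simp [PySem.List.insertBy, this, ih (fun y hy => ha y (by simp [hy]))]

theorem key_of_mem_filter (i : Int) (ts : List String) (y : String)
    (hy : y ∈ ts.filter (fun t => pvKey t == i)) : pvKey y = i := by
  have := (List.mem_filter.mp hy).2
  simpa using this

theorem pvKey_cases (t : String) : pvKey t = 0 ∨ pvKey t = 1 ∨ pvKey t = 2 := by
  by_cases h1 : PySem.Str.isIn "player" (PySem.Str.lower t) = true
  all_goals simp at h1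
  · simp [pvKey, h1]
  · by_cases h2 : PySem.Str.isIn "enemy" (PySem.Str.lower t) = true
    all_goals simp at h2
    · simp [pvKey, h1, h2]
    · simp [pvKey, h1, h2]

-- the stable sort by pvKey is exactly "key-0 elements, then key-1, then key-2", each in input order
theorem sorted_eq_filters (ts : List String) :
    PySem.List.sorted ts pvKey =
      ts.filter (fun t => pvKey t == 0) ++ ts.filter (fun t => pvKey t == 1) ++
        ts.filter (fun t => pvKey t == 2) := by
  induction ts using List.reverseRecOn with
  | nil => rfl
  | append_singleton ts x ih =>
    rw [PySem.List.sorted_eq_foldl_insertBy, List.foldl_append, ← PySem.List.sorted_eq_foldl_insertBy, ih]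
    simp only [List.foldl_cons, List.foldl_nil, List.filter_append, List.filter_cons, List.filter_nil]
    rcases pvKey_cases x with h | h | h <;> simp only [h]
    · rw [List.append_assoc,
        insertBy_mid _ x _ _
          (fun y hy => by simp [key_of_mem_filter 0 ts y hy, h])
          (fun y hy => by
            rcases List.mem_append.mp hy with hy | hy
            · simp [key_of_mem_filter 1 ts y hy, h]
            · simp [key_of_mem_filter 2 ts y hy, h])]
      simp
    · rw [← List.append_assoc,
        insertBy_mid _ x _ _
          (fun y hy => by
            rcases List.mem_append.mp hy with hy | hy
            · simp [key_of_mem_filter 0 ts y hy, h]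
            · simp [key_of_mem_filter 1 ts y hy, h])
          (fun y hy => by simp [key_of_mem_filter 2 ts y hy, h])]
      simp
    · rw [← List.append_nil (_ ++ _ ++ _),
        insertBy_mid _ x _ []
          (fun y hy => by
            rcases List.mem_append.mp hy with hy | hy
            · rcases List.mem_append.mp hy with hy | hy
              · simp [key_of_mem_filter 0 ts y hy, h]
              · simp [key_of_mem_filter 1 ts y hy, h]
            · simp [key_of_mem_filter 2 ts y hy, h])
          (by simp)]
      simp

-- ===== VERDICT (by name: the statement is the Claim_ definition above) =====
theorem prioritize_targets_spec : Claim_equal_prioritize_targets := by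
  intro ts _
  unfold Spec_prioritize_targets prioritize_targets prioritize_targets_alt
  rw [foldl_stepA, sorted_eq_filters]
  simp
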